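-- pv_equiv track=rewrite | github.com/LeninGF/clasificaion_robos_fge | utils.py | validar_cedula
-- ===== SOURCE A (Python) =====
-- def validar_cedula(texto):
--     if texto is None:
--         return 0
--     if not texto.isnumeric():
--         return 0
--     if len(texto) < 10 and len(texto) > 0:
--         return 0
--     if len(texto) > 10:
--         return 0
--     # sin ceros a la izquierda
--     # nocero = texto.strip("0")
--     nocero = texto.lstrip("0")
--     if len(nocero) == 0:
--         return 0
--     cedula = int(nocero,0)
--     verificador = cedula%10
--     numero = cedula//10
--
--     # mientras tenga números
--     suma = 0
--     while (numero > 0):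
--
--         # posición impar
--         posimpar = numero%10
--         numero   = numero//10
--         posimpar = 2*posimpar
--         if (posimpar  > 9):
--             posimpar = posimpar-9
--
--         # posición par
--         pospar = numero%10
--         numero = numero//10
--
--         suma = suma + posimpar + pospar
--
--     decenasup = suma//10 + 1
--     calculado = decenasup*10 - suma
--     if (calculado  >= 10):
--         calculado = calculado - 10
--
--     if (calculado == verificador):
--         validado = 1
--     else:
--         validado = 0
--
--     return (validado)
-- ===== SOURCE B (Python) =====
-- def validar_cedula(texto):
--     if texto is None:
--         return 0
--     if not texto.isnumeric():
--         return 0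
--     if len(texto) != 10:
--         return 0
--     nocero = texto.lstrip("0")
--     if len(nocero) == 0:
--         return 0
--     verificador = int(nocero[-1])
--     suma = 0
--     for k, ch in enumerate(reversed(nocero[:-1])):
--         d = int(ch)
--         if k % 2 == 0:
--             d *= 2
--             if d > 9:
--                 d -= 9
--         suma += d
--     calculado = (10 - suma % 10) % 10
--     return 1 if calculado == verificador else 0
-- ===== Notes on version B (the rewrite author's own statement) =====
-- stated objective: alternative
-- what changed: A converts the stripped string to an integer and extracts two digits per iteration with mod/div while accumulating the Luhn-style sum, then derives the check digit via a next-multiple-of-ten computation; B never loops on the integer: it makes one pass over the leading digit characters from the right with parity weights and computes the check digit in closed form as (10 - suma % 10) % 10.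
import Mathlib
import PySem

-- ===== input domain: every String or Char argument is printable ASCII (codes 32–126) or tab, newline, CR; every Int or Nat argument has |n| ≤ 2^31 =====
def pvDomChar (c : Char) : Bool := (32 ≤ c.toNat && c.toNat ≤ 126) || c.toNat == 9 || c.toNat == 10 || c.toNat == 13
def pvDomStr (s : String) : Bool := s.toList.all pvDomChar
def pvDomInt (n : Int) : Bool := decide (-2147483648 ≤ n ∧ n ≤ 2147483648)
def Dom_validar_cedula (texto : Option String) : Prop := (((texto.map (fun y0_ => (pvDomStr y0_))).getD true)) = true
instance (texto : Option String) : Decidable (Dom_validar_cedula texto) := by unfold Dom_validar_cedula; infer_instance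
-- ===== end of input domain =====

-- B replaces A's two-digits-per-iteration integer mod/div loop by a single character pass over the
-- stripped digit string (position-parity weights, rightmost first) with the check digit in closed
-- form: an alternative decomposition of the same checksum, same cost.

-- ===== PORT A =====

-- hand port of `int(nocero, 0)`: exact at its (only) call site, where `nocero` is a nonempty
-- all-ASCII-digit string with no leading zero (guaranteed by the guards before it), so Python's
-- base-0 parsing is plain decimal.
def pvIntBase0 (cs : List Char) : Int :=
  cs.foldl (fun a c => 10 * a + ((c.toNat : Int) - 48)) 0

-- the `while (numero > 0)` loop of A, on the running (numero, suma) state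
def pvALoop (numero suma : Int) : Int :=
  if 0 < numero then
    let posimpar := PySem.Int.mod numero 10
    let numero1 := PySem.Int.floordiv numero 10
    let posimpar2 := 2 * posimpar
    let posimpar3 := if posimpar2 > 9 then posimpar2 - 9 else posimpar2
    let pospar := PySem.Int.mod numero1 10
    let numero2 := PySem.Int.floordiv numero1 10
    pvALoop numero2 (suma + posimpar3 + pospar)
  else suma
termination_by numero.toNat
decreasing_by
  simp only [PySem.Int.floordiv_eq_ediv_of_pos (by norm_num : (0:Int) < 10)]
  omega

-- A's guards and checksum; texto.isnumeric() is ported as str.isdigit, which coincides with it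
-- on the ASCII domain; texto.lstrip("0") is ported by hand as dropWhile (exact for this one-char strip set)
def validar_cedula (texto : Option String) : Int :=
  match texto with
  | none => 0
  | some t =>
    if ¬ (PySem.Str.strIsdigit t) then 0
    else if PySem.Str.len t < 10 ∧ PySem.Str.len t > 0 then 0
    else if PySem.Str.len t > 10 then 0
    else
      let nocero := t.toList.dropWhile (· == '0')
      if nocero.length = 0 then 0
      else
        let cedula := pvIntBase0 nocero
        let verificador := PySem.Int.mod cedula 10
        let numero := PySem.Int.floordiv cedula 10
        let suma := pvALoop numero 0
        let decenasup := PySem.Int.floordiv suma 10 + 1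
        let calculado := decenasup * 10 - suma
        let calculado2 := if calculado ≥ 10 then calculado - 10 else calculado
        if calculado2 = verificador then 1 else 0

-- ===== PORT B =====

-- int(ch) on a one-character string
def pvDigit (c : Char) : Int := (PySem.Int.ofChars? [c]).getD 0

-- B: same guards (a nonempty all-digit string passes A's two length guards iff its length is 10),
-- then one pass over the leading digits from the right with parity weights and a closed-form check digit
def validar_cedula_alt (texto : Option String) : Int :=
  match texto with
  | none => 0
  | some t =>
    if ¬ (PySem.Str.strIsdigit t) then 0
    else if ¬ (PySem.Str.len t = 10) then 0
    else
      let nocero := t.toList.dropWhile (· == '0')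
      if nocero.length = 0 then 0
      else
        let verificador :=
          match PySem.List.pyGet? nocero (-1) with
          | some c => pvDigit c
          | none => 0
        let body := PySem.List.slice nocero none (some (-1))
        let suma := (PySem.List.enumerate body.reverse).foldl
          (fun suma p =>
            let d := pvDigit p.2
            let d2 := if PySem.Int.mod p.1 2 = 0 then
                (let dd := 2 * d; if dd > 9 then dd - 9 else dd)
              else d
            suma + d2) 0
        let calculado := PySem.Int.mod (10 - PySem.Int.mod suma 10) 10
        if calculado = verificador then 1 else 0

-- ===== PRECONDITION & SPEC =====
def Spec_validar_cedula (texto : Option String) (out : Int) : Prop := out = validar_cedula_alt texto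
instance (texto : Option String) (out : Int) : Decidable (Spec_validar_cedula texto out) := by unfold Spec_validar_cedula; infer_instance

-- ===== CLAIM (what is proved, stated in full; the proofs are below) =====
def Claim_equal_validar_cedula : Prop := ∀ (texto : Option String), Dom_validar_cedula texto → Spec_validar_cedula texto (validar_cedula texto)

-- ===== LEMMAS AND PROOFS =====

def pvDvN (c : Char) : Nat := c.toNat - 48

def pvWsum : List Nat → Nat → Int
  | [], _ => 0
  | a :: rest, k =>
      (if k % 2 = 0 then (if 2 * (a : Int) > 9 then 2 * (a : Int) - 9 else 2 * (a : Int)) else (a : Int))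
        + pvWsum rest (k + 1)

def pvList2Rec {α : Type} {motive : List α → Prop} (h0 : motive []) (h1 : ∀ a, motive [a])
    (h2 : ∀ a b l, motive l → motive (a :: b :: l)) : ∀ l, motive l
  | [] => h0
  | [a] => h1 a
  | a :: b :: l => h2 a b l (pvList2Rec h0 h1 h2 l)

theorem pvWsum_shift (l : List Nat) : ∀ k, pvWsum l (k + 2) = pvWsum l k := by
  induction l with
  | nil => intro k; rfl
  | cons a rest ih =>
      intro k
      show _ + pvWsum rest (k + 2 + 1) = _ + pvWsum rest (k + 1)
      rw [show k + 2 + 1 = (k + 1) + 2 by ring, ih (k + 1)]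
      have : (k + 2) % 2 = k % 2 := by omega
      rw [this]

theorem pvWsum_nonneg (l : List Nat) : ∀ k, 0 ≤ pvWsum l k := by
  induction l with
  | nil => intro k; simp [pvWsum]
  | cons a rest ih =>
      intro k
      have := ih (k + 1)
      show 0 ≤ _ + pvWsum rest (k + 1)
      have ha : (0:Int) ≤ (a:Int) := by positivity
      split_ifs <;> omega

theorem pvWsum_zero (l : List Nat) (h : Nat.ofDigits 10 l = 0) : ∀ k, pvWsum l k = 0 := by
  induction l with
  | nil => intro k; rfl
  | cons a rest ih =>
      intro k
      rw [Nat.ofDigits_cons] at h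
      have ha : a = 0 := by omega
      have hr : Nat.ofDigits 10 rest = 0 := by omega
      show _ + pvWsum rest (k + 1) = 0
      rw [ih hr (k + 1), ha]
      norm_num

theorem pvALoop_eq (ds : List Nat) (h : ∀ d ∈ ds, d < 10) :
    ∀ acc : Int, pvALoop ((Nat.ofDigits 10 ds : Nat) : Int) acc = acc + pvWsum ds 0 := by
  induction ds using pvList2Rec with
  | h0 => intro acc; rw [pvALoop]; simp [pvWsum]
  | h1 a =>
      intro acc
      have ha : a < 10 := h a (by simp)
      rw [pvALoop]
      by_cases h0 : a = 0
      · subst h0; norm_num [pvWsum, Nat.ofDigits]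
      · have hpos : (0:Int) < ((Nat.ofDigits 10 [a] : Nat) : Int) := by
          simp [Nat.ofDigits]; omega
        rw [if_pos hpos]
        simp only [PySem.Int.floordiv_eq_ediv_of_pos (by norm_num : (0:Int) < 10),
          PySem.Int.mod_eq_emod_of_pos (by norm_num : (0:Int) < 10)]
        have hval : ((Nat.ofDigits 10 [a] : Nat) : Int) = (a : Int) := by simp [Nat.ofDigits]
        rw [hval]
        have hmod : (a : Int) % 10 = (a : Int) := by omega
        have hdiv : (a : Int) / 10 = 0 := by omega
        rw [hmod, hdiv]
        norm_num
        rw [pvALoop]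
        norm_num [pvWsum]
  | h2 a b rest ih =>
      intro acc
      have ha : a < 10 := h a (by simp)
      have hb : b < 10 := h b (by simp)
      have hrest : ∀ d ∈ rest, d < 10 := fun d hd => h d (by simp [hd])
      have hval : ((Nat.ofDigits 10 (a :: b :: rest) : Nat) : Int)
          = (a : Int) + 10 * (b : Int) + 100 * ((Nat.ofDigits 10 rest : Nat) : Int) := by
        rw [Nat.ofDigits_cons, Nat.ofDigits_cons]; push_cast; ring
      rw [pvALoop, hval]
      by_cases hz : (a : Int) + 10 * (b : Int) + 100 * ((Nat.ofDigits 10 rest : Nat) : Int) ≤ 0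
      · have hm : (Nat.ofDigits 10 rest : Nat) = 0 := by
          have h1 : (0:Int) ≤ (a:Int) := by positivity
          have h2 : (0:Int) ≤ (b:Int) := by positivity
          have h3 : (0:Int) ≤ ((Nat.ofDigits 10 rest : Nat) : Int) := by positivity
          omega
        have ha0 : a = 0 := by
          have h3 : (0:Int) ≤ ((Nat.ofDigits 10 rest : Nat) : Int) := by positivity
          omega
        have hb0 : b = 0 := by
          have h3 : (0:Int) ≤ ((Nat.ofDigits 10 rest : Nat) : Int) := by positivity
          omega
        rw [if_neg (by omega)]
        show acc = acc + pvWsum (a :: b :: rest) 0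
        have := pvWsum_zero rest hm 2
        subst ha0; subst hb0
        show acc = acc + (_ + (_ + pvWsum rest 2))
        rw [this]
        norm_num
      · rw [if_pos (by omega)]
        simp only [PySem.Int.floordiv_eq_ediv_of_pos (by norm_num : (0:Int) < 10),
          PySem.Int.mod_eq_emod_of_pos (by norm_num : (0:Int) < 10)]
        set m : Int := ((Nat.ofDigits 10 rest : Nat) : Int) with hm
        have hm0 : 0 ≤ m := by positivity
        have e1 : ((a : Int) + 10 * (b : Int) + 100 * m) % 10 = (a : Int) := by omega
        have e2 : ((a : Int) + 10 * (b : Int) + 100 * m) / 10 = (b : Int) + 10 * m := by omega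
        have e3 : ((b : Int) + 10 * m) % 10 = (b : Int) := by omega
        have e4 : ((b : Int) + 10 * m) / 10 = m := by omega
        rw [e1, e2, e3, e4]
        rw [ih hrest]
        show acc + _ + _ + pvWsum rest 0 = acc + (_ + (_ + pvWsum rest 2))
        rw [pvWsum_shift rest 0]
        norm_num
        split_ifs <;> ring

theorem char_eq_of_toNat (c : Char) (n : Nat) (hc : Char.toNat c = n) (d : Char) (hd : Char.toNat d = n) : c = d := by
  apply Char.ext
  apply UInt32.toNat_inj.mp
  show c.toNat = d.toNat
  rw [hc, hd]

theorem isdigit_toNat (c : Char) (h : PySem.Chars.isdigit c = true) :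
    48 ≤ c.toNat ∧ c.toNat ≤ 57 := by
  simpa [PySem.Chars.isdigit, Char.le_def, UInt32.le_iff_toNat_le] using h

theorem pvDvN_lt (c : Char) (h : PySem.Chars.isdigit c = true) : pvDvN c < 10 := by
  have := isdigit_toNat c h
  unfold pvDvN
  omega

theorem pvDigit_isdigit (c : Char) (h : PySem.Chars.isdigit c = true) :
    pvDigit c = ((pvDvN c : Nat) : Int) := by
  obtain ⟨ha, hb⟩ := isdigit_toNat c h
  have hten : c = '0' ∨ c = '1' ∨ c = '2' ∨ c = '3' ∨ c = '4' ∨ c = '5' ∨ c = '6' ∨ c = '7' ∨ c = '8' ∨ c = '9' := by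
    interval_cases hv : c.toNat <;>
      [ exact Or.inl (char_eq_of_toNat c 48 hv '0' rfl);
        exact Or.inr (Or.inl (char_eq_of_toNat c 49 hv '1' rfl));
        exact Or.inr (Or.inr (Or.inl (char_eq_of_toNat c 50 hv '2' rfl)));
        exact Or.inr (Or.inr (Or.inr (Or.inl (char_eq_of_toNat c 51 hv '3' rfl))));
        exact Or.inr (Or.inr (Or.inr (Or.inr (Or.inl (char_eq_of_toNat c 52 hv '4' rfl)))));
        exact Or.inr (Or.inr (Or.inr (Or.inr (Or.inr (Or.inl (char_eq_of_toNat c 53 hv '5' rfl))))));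
        exact Or.inr (Or.inr (Or.inr (Or.inr (Or.inr (Or.inr (Or.inl (char_eq_of_toNat c 54 hv '6' rfl)))))));
        exact Or.inr (Or.inr (Or.inr (Or.inr (Or.inr (Or.inr (Or.inr (Or.inl (char_eq_of_toNat c 55 hv '7' rfl))))))));
        exact Or.inr (Or.inr (Or.inr (Or.inr (Or.inr (Or.inr (Or.inr (Or.inr (Or.inl (char_eq_of_toNat c 56 hv '8' rfl)))))))));
        exact Or.inr (Or.inr (Or.inr (Or.inr (Or.inr (Or.inr (Or.inr (Or.inr (Or.inr (char_eq_of_toNat c 57 hv '9' rfl)))))))))]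
  rcases hten with h'|h'|h'|h'|h'|h'|h'|h'|h'|h' <;> subst h' <;> decide

theorem pvIntBase0_aux (cs : List Char) (h : ∀ c ∈ cs, PySem.Chars.isdigit c = true) :
    ∀ acc : Nat, cs.foldl (fun a c => 10 * a + ((c.toNat : Int) - 48)) ((acc : Nat) : Int)
      = (((acc * 10 ^ cs.length + Nat.ofDigits 10 ((cs.map pvDvN).reverse) : Nat)) : Int) := by
  induction cs with
  | nil => intro acc; simp
  | cons c cs' ih =>
      intro acc
      have hc := isdigit_toNat c (h c (by simp))
      have hstep : 10 * ((acc : Nat) : Int) + ((c.toNat : Int) - 48)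
          = (((10 * acc + pvDvN c : Nat)) : Int) := by
        unfold pvDvN; push_cast; omega
      show List.foldl _ (10 * ((acc : Nat) : Int) + ((c.toNat : Int) - 48)) cs' = _
      rw [hstep, ih (fun d hd => h d (by simp [hd])) (10 * acc + pvDvN c)]
      congr 1
      rw [List.map_cons, List.reverse_cons, Nat.ofDigits_append]
      simp [Nat.ofDigits]
      ring

theorem pvBfold (cs : List Char) (h : ∀ c ∈ cs, PySem.Chars.isdigit c = true) :
    ∀ (k : Nat) (acc : Int),
      (PySem.List.enumerate cs ((k : Nat) : Int)).foldl
        (fun suma p =>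
          let d := pvDigit p.2
          let d2 := if PySem.Int.mod p.1 2 = 0 then
              (let dd := 2 * d; if dd > 9 then dd - 9 else dd)
            else d
          suma + d2) acc
      = acc + pvWsum (cs.map pvDvN) k := by
  induction cs with
  | nil => intro k acc; simp [PySem.List.enumerate, pvWsum]
  | cons c cs' ih =>
      intro k acc
      rw [PySem.List.enumerate_cons]
      have hcast : ((k : Nat) : Int) + 1 = (((k + 1 : Nat)) : Int) := by push_cast; ring
      rw [List.foldl_cons, hcast, ih (fun d hd => h d (by simp [hd])) (k + 1)]
      have hd : pvDigit c = ((pvDvN c : Nat) : Int) := pvDigit_isdigit c (h c (by simp))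
      have hmod : PySem.Int.mod ((k : Nat) : Int) 2 = (((k % 2 : Nat)) : Int) := by
        rw [PySem.Int.mod_eq_emod_of_pos (by norm_num : (0:Int) < 2)]
        omega
      show acc + _ + pvWsum (cs'.map pvDvN) (k + 1) = acc + pvWsum ((c :: cs').map pvDvN) k
      rw [List.map_cons]
      show _ = acc + ((if k % 2 = 0 then _ else _) + pvWsum (cs'.map pvDvN) (k + 1))
      simp only [hd, hmod]
      by_cases hk : k % 2 = 0
      · rw [if_pos (by rw [hk]; norm_num), if_pos hk]
        ring
      · rw [if_neg (by
          intro hcon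
          apply hk
          omega), if_neg hk]
        ring

theorem pv_main (texto : Option String) : validar_cedula texto = validar_cedula_alt texto := by
  cases texto with
  | none => rfl
  | some t =>
    show (if ¬ (PySem.Str.strIsdigit t) = true then _ else _)
        = (if ¬ (PySem.Str.strIsdigit t) = true then _ else _)
    by_cases hsd : PySem.Str.strIsdigit t = true
    case neg => rw [if_pos hsd, if_pos hsd]
    case pos =>
      rw [if_neg (not_not_intro hsd), if_neg (not_not_intro hsd)]
      have hsd' : PySem.Chars.strIsdigit t.toList = true := by
        rw [← hsd]; simp [pysem]
      have hprops : t.toList ≠ [] ∧ ∀ c ∈ t.toList, PySem.Chars.isdigit c = true := by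
        simp [PySem.Chars.strIsdigit] at hsd'
        exact ⟨by simpa using hsd'.1, hsd'.2⟩
      obtain ⟨hne, hall⟩ := hprops
      have hlen' : PySem.Str.len t = (t.toList.length : Int) := by simp [pysem]
      have hpos : 0 < t.toList.length := List.length_pos_iff.mpr hne
      by_cases hlen : t.toList.length = 10
      · have g1 : ¬ (PySem.Str.len t < 10 ∧ PySem.Str.len t > 0) := by
          rw [hlen', hlen]; omega
        have g2 : ¬ (PySem.Str.len t > 10) := by rw [hlen', hlen]; omega
        have g3 : ¬ ¬ (PySem.Str.len t = 10) := by rw [hlen', hlen]; omega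
        rw [if_neg g1, if_neg g2, if_neg g3]
        set nocero := t.toList.dropWhile (· == '0') with hnoc
        by_cases hnc : nocero.length = 0
        · rw [if_pos hnc, if_pos hnc]
        · rw [if_neg hnc, if_neg hnc]
          have hne2 : nocero ≠ [] := by
            intro hcon; apply hnc; rw [hcon]; rfl
          have hnd : ∀ c ∈ nocero, PySem.Chars.isdigit c = true := by
            intro c hc
            exact hall c ((List.dropWhile_sublist _).mem hc)
          set lc := nocero.getLast hne2 with hlc
          set body := nocero.dropLast with hbody
          have heq : body ++ [lc] = nocero := List.dropLast_concat_getLast hne2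
          have hlcd : PySem.Chars.isdigit lc = true := hnd lc (by rw [← heq]; simp)
          set dl := pvDvN lc with hdl
          set Rb := (body.map pvDvN).reverse with hRb
          have hdl10 : dl < 10 := pvDvN_lt lc hlcd
          have hRbd : ∀ d ∈ Rb, d < 10 := by
            intro d hd
            rw [hRb, List.mem_reverse, List.mem_map] at hd
            obtain ⟨c, hc, hcd⟩ := hd
            rw [← hcd]
            exact pvDvN_lt c (hnd c (by rw [← heq]; exact List.mem_append_left _ hc))
          have hlist : (nocero.map pvDvN).reverse = dl :: Rb := by
            rw [← heq]; simp [hRb, hdl]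
          have hparse : pvIntBase0 nocero
              = ((Nat.ofDigits 10 (dl :: Rb) : Nat) : Int) := by
            have h0 : ((0 : Nat) : Int) = (0 : Int) := by norm_num
            unfold pvIntBase0
            rw [← h0, pvIntBase0_aux nocero hnd 0, hlist]
            norm_num
          have hval : (Nat.ofDigits 10 (dl :: Rb) : Nat)
              = dl + 10 * Nat.ofDigits 10 Rb := by
            rw [Nat.ofDigits_cons]
          set vb := Nat.ofDigits 10 Rb with hvb
          have hverifA : PySem.Int.mod (pvIntBase0 nocero) 10 = ((dl : Nat) : Int) := by
            rw [hparse, PySem.Int.mod_eq_emod_of_pos (by norm_num : (0:Int) < 10), hval]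
            push_cast
            omega
          have hnumero : PySem.Int.floordiv (pvIntBase0 nocero) 10 = ((vb : Nat) : Int) := by
            rw [hparse, PySem.Int.floordiv_eq_ediv_of_pos (by norm_num : (0:Int) < 10), hval]
            push_cast
            omega
          have hsumA : pvALoop (PySem.Int.floordiv (pvIntBase0 nocero) 10) 0
              = pvWsum Rb 0 := by
            rw [hnumero, hvb, pvALoop_eq Rb hRbd 0, zero_add]
          have hget : PySem.List.pyGet? nocero (-1) = some lc := by
            simp [pysem]
            exact List.getLast?_eq_some_getLast hne2
          have hslice : PySem.List.slice nocero none (some (-1)) = body := by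
            rw [hbody]
            simp [pysem]
          have hverifB : pvDigit lc = ((dl : Nat) : Int) := pvDigit_isdigit lc hlcd
          have hbd : ∀ c ∈ body.reverse, PySem.Chars.isdigit c = true := by
            intro c hc
            rw [List.mem_reverse] at hc
            exact hnd c (by rw [← heq]; exact List.mem_append_left _ hc)
          have hsumB := pvBfold body.reverse hbd 0 0
          rw [List.map_reverse, ← hRb] at hsumB
          simp only [Nat.cast_zero, zero_add] at hsumB
          set s := pvWsum Rb 0 with hs
          have hs0 : 0 ≤ s := pvWsum_nonneg Rb 0
          have hfinal : (if (PySem.Int.floordiv s 10 + 1) * 10 - s ≥ 10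
                then (PySem.Int.floordiv s 10 + 1) * 10 - s - 10
                else (PySem.Int.floordiv s 10 + 1) * 10 - s)
              = PySem.Int.mod (10 - PySem.Int.mod s 10) 10 := by
            rw [PySem.Int.floordiv_eq_ediv_of_pos (by norm_num : (0:Int) < 10),
              PySem.Int.mod_eq_emod_of_pos (by norm_num : (0:Int) < 10),
              PySem.Int.mod_eq_emod_of_pos (by norm_num : (0:Int) < 10)]
            split_ifs <;> omega
          simp only [hget, hslice]
          simp only [hverifA, hverifB, hsumA, hsumB, hfinal]
      · by_cases hlt : t.toList.length < 10
        · rw [if_pos (by rw [hlen']; constructor <;> [omega; omega]),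
            if_pos (by rw [hlen']; omega)]
        · have g1 : ¬ (PySem.Str.len t < 10 ∧ PySem.Str.len t > 0) := by
            rw [hlen']; omega
          rw [if_neg g1, if_pos (by rw [hlen']; omega : PySem.Str.len t > 10),
            if_pos (by rw [hlen']; omega)]

-- ===== VERDICT (by name: the statement is the Claim_ definition above) =====
theorem validar_cedula_spec : Claim_equal_validar_cedula := by
  intro texto _
  exact pv_main texto
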